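-- pv_equiv track=rewrite | github.com/KwokchunYi/CP1404-Practical | prac_05/wimbledon.py | count_champions
-- ===== SOURCE A (Python) =====
-- def count_champions(champions_data):
--     """Counts the number of wins for each champion and returns a dictionary."""
--     champion_counts = {}
--     for champion, country, wins in champions_data:
--         wins = int(wins)  # Convert wins to an integer
--         if champion in champion_counts:
--             champion_counts[champion] += wins
--         else:
--             champion_counts[champion] = wins
--     return champion_counts
-- ===== SOURCE B (Python) =====
-- def count_champions(champions_data):
--     """Counts the number of wins for each champion and returns a dictionary."""
--     names = list(dict.fromkeys(champion for champion, _, _ in champions_data))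
--     return {c: sum(int(wins) for champion, _, wins in champions_data if champion == c)
--             for c in names}
-- ===== Notes on version B (the rewrite author's own statement) =====
-- stated objective: alternative
-- what changed: Replaces the single hash-accumulation loop with a two-phase group-by: collect the distinct champion names in first-occurrence order, then sum int(wins) over each champion's records with a filtered scan.
import Mathlib
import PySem

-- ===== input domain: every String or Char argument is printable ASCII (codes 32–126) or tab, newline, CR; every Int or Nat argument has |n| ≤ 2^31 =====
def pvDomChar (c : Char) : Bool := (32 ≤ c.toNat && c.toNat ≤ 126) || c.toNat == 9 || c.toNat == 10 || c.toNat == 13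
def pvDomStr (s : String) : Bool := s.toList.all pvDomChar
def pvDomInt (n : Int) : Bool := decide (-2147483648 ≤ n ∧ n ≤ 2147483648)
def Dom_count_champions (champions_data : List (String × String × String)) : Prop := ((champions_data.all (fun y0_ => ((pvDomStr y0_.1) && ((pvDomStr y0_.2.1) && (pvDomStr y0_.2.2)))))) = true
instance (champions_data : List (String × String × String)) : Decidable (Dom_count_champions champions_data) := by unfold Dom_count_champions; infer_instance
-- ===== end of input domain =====

-- B replaces A's hash-accumulation loop with a group-by (distinct champion names in first-occurrence order, then a filtered sum of int(wins) per name): alternative decomposition, not claimed faster.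


-- ===== PORT A =====
-- int(wins): on inputs admitted by Pre_ the parse succeeds; .getD 0 is never the
-- taken branch inside Pre_ (Python raises ValueError there, excluded by Pre_).
def count_champions (champions_data : List (String × String × String)) : List (String × Int) :=
  (champions_data.foldl
    (fun champion_counts r =>
      let wins : Int := (PySem.Int.ofStr? r.2.2).getD 0
      if champion_counts.contains r.1 then
        champion_counts.insert r.1 (champion_counts.getD r.1 0 + wins)
      else
        champion_counts.insert r.1 wins)
    PySem.Dict.empty).items

-- ===== PORT B =====
def count_champions_alt (champions_data : List (String × String × String)) : List (String × Int) :=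
  let names := PySem.List.dedup (champions_data.map (fun r => r.1))
  names.map (fun c =>
    (c, ((champions_data.filter (fun r => r.1 == c)).map
           (fun r => (PySem.Int.ofStr? r.2.2).getD 0)).sum))

-- ===== PRECONDITION & SPEC =====
-- Pre_ excludes exactly the inputs where Python's int(wins) raises ValueError.
def Pre_count_champions (champions_data : List (String × String × String)) : Prop :=
  ∀ r ∈ champions_data, (PySem.Int.ofStr? r.2.2).isSome = true
instance (champions_data : List (String × String × String)) : Decidable (Pre_count_champions champions_data) := by unfold Pre_count_champions; infer_instance
def pvWitness_count_champions : (List (String × String × String)) :=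
  [("Federer", "Switzerland", "8"), ("Nadal", "Spain", "2"), ("Federer", "Switzerland", "1")]
def Spec_count_champions (champions_data : List (String × String × String)) (out : List (String × Int)) : Prop := out = count_champions_alt champions_data
instance (champions_data : List (String × String × String)) (out : List (String × Int)) : Decidable (Spec_count_champions champions_data out) := by unfold Spec_count_champions; infer_instance

-- ===== CLAIM (what is proved, stated in full; the proofs are below) =====
def Claim_equal_count_champions : Prop := ∀ (champions_data : List (String × String × String)), Dom_count_champions champions_data → Pre_count_champions champions_data → Spec_count_champions champions_data (count_champions champions_data)

-- ===== LEMMAS AND PROOFS =====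

-- The loop body of A is an unconditional insert of (old value + wins).
lemma stepA_eq (d : PySem.Dict String Int) (r : String × String × String) :
    (let wins : Int := (PySem.Int.ofStr? r.2.2).getD 0
     if d.contains r.1 then d.insert r.1 (d.getD r.1 0 + wins) else d.insert r.1 wins)
    = d.insert r.1 (d.getD r.1 0 + (PySem.Int.ofStr? r.2.2).getD 0) := by
  by_cases h : d.contains r.1 = true
  · simp [h]
  · have hnone : d.get? r.1 = none := by
      simpa [PySem.Dict.get?_eq_none_iff_contains] using h
    simp [h, PySem.Dict.getD, hnone]

lemma getD_foldA (l : List (String × String × String)) (d : PySem.Dict String Int) (v : String) :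
    (l.foldl (fun d r => d.insert r.1 (d.getD r.1 0 + (PySem.Int.ofStr? r.2.2).getD 0)) d).getD v 0
    = d.getD v 0 + ((l.filter (fun r => r.1 == v)).map (fun r => (PySem.Int.ofStr? r.2.2).getD 0)).sum := by
  induction l generalizing d with
  | nil => simp
  | cons r t ih =>
    simp only [List.foldl_cons, ih, List.filter_cons]
    by_cases h : r.1 = v
    · simp [h, PySem.Dict.getD_insert_self, add_assoc]
    · have : v ≠ r.1 := fun e => h e.symm
      simp [h, PySem.Dict.getD_insert_of_ne _ _ _ this]

-- ===== VERDICT (by name: the statement is the Claim_ definition above) =====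
theorem count_champions_spec : Claim_equal_count_champions := by
  intro data _ _
  show count_champions data = count_champions_alt data
  unfold count_champions count_champions_alt
  have hstep : (fun (d : PySem.Dict String Int) (r : String × String × String) =>
      let wins : Int := (PySem.Int.ofStr? r.2.2).getD 0
      if d.contains r.1 then d.insert r.1 (d.getD r.1 0 + wins) else d.insert r.1 wins)
      = (fun d r => d.insert r.1 (d.getD r.1 0 + (PySem.Int.ofStr? r.2.2).getD 0)) := by
    funext d r; exact stepA_eq d r
  rw [hstep]
  set F := fun (d : PySem.Dict String Int) (r : String × String × String) =>
    d.insert r.1 (d.getD r.1 0 + (PySem.Int.ofStr? r.2.2).getD 0) with hF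
  have hkeys : (data.foldl F PySem.Dict.empty).keys
      = PySem.Set.update (PySem.Dict.empty (κ := String) (ν := Int)).keys (data.map (fun r => r.1)) := by
    rw [hF]
    exact PySem.Dict.keys_foldl_insert_key data (fun r => r.1) _ PySem.Dict.empty
  have hnodup : (data.foldl F PySem.Dict.empty).keys.Nodup := by
    rw [hF]
    exact PySem.Dict.nodup_keys_foldl_insert_key data (fun r => r.1) _ PySem.Dict.empty (by simp)
  rw [PySem.Dict.items_eq_map_keys _ hnodup 0, hkeys]
  simp only [PySem.Dict.keys_empty, PySem.Set.update_nil_left, PySem.List.dedup_eq_ofList]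
  apply List.map_congr_left
  intro c _
  rw [hF, getD_foldA]
  simp
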